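-- pv_equiv track=rewrite | github.com/ddeeezzz/music_video_pipeline | src/music_video_pipeline/modules/cross_bcd/scheduler_engine.py | _count_selected_not_done_units
-- ===== SOURCE A (Python) =====
-- from typing import Any
--
-- def _count_selected_not_done_units(
--     selected_indexes: set[int],
--     failed_chain_indexes: set[int],
--     unit_by_index: dict[int, dict[str, Any]],
-- ) -> int:
--     not_done_count = 0
--     for unit_index in selected_indexes:
--         if unit_index in failed_chain_indexes:
--             continue
--         status = str(unit_by_index.get(unit_index, {}).get("status", "pending"))
--         if status != "done":
--             not_done_count += 1
--     return not_done_count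
-- ===== SOURCE B (Python) =====
-- def _count_selected_not_done_units(
--     selected_indexes,
--     failed_chain_indexes,
--     unit_by_index,
-- ):
--     done_indexes = {
--         unit_index
--         for unit_index, unit in unit_by_index.items()
--         if str(unit.get("status", "pending")) == "done"
--     }
--     return len(selected_indexes - failed_chain_indexes - done_indexes)
-- ===== Notes on version B (the rewrite author's own statement) =====
-- stated objective: alternative
-- what changed: B inverts the traversal: a single pass over unit_by_index builds the set of indexes whose status is 'done', then the answer is pure set arithmetic len(selected_indexes - failed_chain_indexes - done_indexes), eliminating A's counting loop with per-element dict lookups and its skip branch.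
import Mathlib
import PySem

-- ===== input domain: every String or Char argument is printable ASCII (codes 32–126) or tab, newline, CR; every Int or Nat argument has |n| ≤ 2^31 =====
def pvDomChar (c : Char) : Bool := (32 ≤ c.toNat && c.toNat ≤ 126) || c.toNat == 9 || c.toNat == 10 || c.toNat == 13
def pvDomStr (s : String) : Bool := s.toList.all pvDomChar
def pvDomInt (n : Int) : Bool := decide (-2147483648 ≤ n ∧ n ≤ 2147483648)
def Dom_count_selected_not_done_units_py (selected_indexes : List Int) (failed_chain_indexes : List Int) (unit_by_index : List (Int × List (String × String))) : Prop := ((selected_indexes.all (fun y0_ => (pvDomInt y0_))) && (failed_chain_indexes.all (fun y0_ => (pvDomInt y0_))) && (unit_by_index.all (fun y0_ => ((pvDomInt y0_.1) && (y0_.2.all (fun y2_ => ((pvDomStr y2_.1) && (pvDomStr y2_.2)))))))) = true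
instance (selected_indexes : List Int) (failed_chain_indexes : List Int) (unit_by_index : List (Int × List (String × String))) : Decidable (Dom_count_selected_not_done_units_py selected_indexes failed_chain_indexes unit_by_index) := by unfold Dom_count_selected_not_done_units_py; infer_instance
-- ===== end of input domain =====

-- B inverts the traversal: one pass over unit_by_index builds the set of 'done' indexes, then the answer is pure
-- set arithmetic len(selected - failed - done) — no per-element dict lookup, no counter loop (objective: alternative).

-- ===== PORT A =====
def count_selected_not_done_units_py (selected_indexes : List Int) (failed_chain_indexes : List Int) (unit_by_index : List (Int × List (String × String))) : Int :=
  selected_indexes.foldl (fun not_done_count unit_index =>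
    if failed_chain_indexes.contains unit_index then not_done_count
    else
      let status := (PySem.Dict.mk ((PySem.Dict.mk unit_by_index).getD unit_index [])).getD "status" "pending"
      if status ≠ "done" then not_done_count + 1 else not_done_count) 0

-- ===== PORT B =====
def count_selected_not_done_units_py_alt (selected_indexes : List Int) (failed_chain_indexes : List Int) (unit_by_index : List (Int × List (String × String))) : Int :=
  let done_indexes : PySem.Set Int :=
    PySem.Set.ofList (((PySem.Dict.mk unit_by_index).items.filter (fun p =>
      (PySem.Dict.mk p.2).getD "status" "pending" == "done")).map Prod.fst)
  PySem.Set.len (PySem.Set.diff (PySem.Set.diff selected_indexes failed_chain_indexes) done_indexes)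

-- ===== PRECONDITION & SPEC =====
-- Pre_ excludes association lists with duplicate keys in unit_by_index: such a list does not represent any Python
-- dict (dict literals collapse duplicates), so first-vs-last-match behaviour there is an artefact of the encoding.
def Pre_count_selected_not_done_units_py (selected_indexes : List Int) (failed_chain_indexes : List Int) (unit_by_index : List (Int × List (String × String))) : Prop :=
  (unit_by_index.map Prod.fst).Nodup
instance (selected_indexes : List Int) (failed_chain_indexes : List Int) (unit_by_index : List (Int × List (String × String))) : Decidable (Pre_count_selected_not_done_units_py selected_indexes failed_chain_indexes unit_by_index) := by unfold Pre_count_selected_not_done_units_py; infer_instance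

def pvWitness_count_selected_not_done_units_py : List Int × List Int × (List (Int × List (String × String))) :=
  ([1, 2, 3], [2], [(1, [("status", "done")]), (3, [("status", "pending")])])

def Spec_count_selected_not_done_units_py (selected_indexes : List Int) (failed_chain_indexes : List Int) (unit_by_index : List (Int × List (String × String))) (out : Int) : Prop := out = count_selected_not_done_units_py_alt selected_indexes failed_chain_indexes unit_by_index
instance (selected_indexes : List Int) (failed_chain_indexes : List Int) (unit_by_index : List (Int × List (String × String))) (out : Int) : Decidable (Spec_count_selected_not_done_units_py selected_indexes failed_chain_indexes unit_by_index out) := by unfold Spec_count_selected_not_done_units_py; infer_instance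

-- ===== CLAIM (what is proved, stated in full; the proofs are below) =====
def Claim_equal_count_selected_not_done_units_py : Prop := ∀ (selected_indexes : List Int) (failed_chain_indexes : List Int) (unit_by_index : List (Int × List (String × String))), Dom_count_selected_not_done_units_py selected_indexes failed_chain_indexes unit_by_index → Pre_count_selected_not_done_units_py selected_indexes failed_chain_indexes unit_by_index → Spec_count_selected_not_done_units_py selected_indexes failed_chain_indexes unit_by_index (count_selected_not_done_units_py selected_indexes failed_chain_indexes unit_by_index)

-- ===== LEMMAS AND PROOFS =====

-- shorthand for the status a unit dict reports
def pvStatus (u : List (String × String)) : String :=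
  (PySem.Dict.mk u).getD "status" "pending"

-- A's loop, characterised: count over selected of 'not failed and status ≠ done'.
theorem pv_foldl_count (failed : List Int) (ubi : List (Int × List (String × String)))
    (sel : List Int) (acc : Int) :
    sel.foldl (fun not_done_count unit_index =>
      if failed.contains unit_index then not_done_count
      else
        let status := (PySem.Dict.mk ((PySem.Dict.mk ubi).getD unit_index [])).getD "status" "pending"
        if status ≠ "done" then not_done_count + 1 else not_done_count) acc
    = acc + ((sel.filter (fun i => !failed.contains i)).countP (fun i =>
        pvStatus ((PySem.Dict.mk ubi).getD i []) ≠ "done") : Int) := by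
  induction sel generalizing acc with
  | nil => simp
  | cons x xs ih =>
    simp only [List.foldl_cons, List.filter_cons, ih]
    by_cases h : x ∈ failed
    · simp [h]
    · by_cases h2 : pvStatus ((PySem.Dict.mk ubi).getD x []) = "done"
      · simp [pvStatus] at h2
        simp [h, h2, pvStatus]
      · simp [pvStatus] at h2
        simp [h, h2, pvStatus]
        ring

-- Membership in B's 'done' set ↔ the status A looks up is "done", given unique dict keys.
theorem pv_mem_done (ubi : List (Int × List (String × String)))
    (hnd : (ubi.map Prod.fst).Nodup) (i : Int) :
    (i ∈ PySem.Set.ofList ((ubi.filter (fun p => pvStatus p.2 == "done")).map Prod.fst))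
    ↔ pvStatus ((PySem.Dict.mk ubi).getD i []) = "done" := by
  rw [PySem.Set.mem_ofList]
  have hkeys : (PySem.Dict.mk ubi).keys = ubi.map Prod.fst := rfl
  constructor
  · intro h
    simp only [List.mem_map, List.mem_filter] at h
    obtain ⟨p, ⟨hp, hdone⟩, hfst⟩ := h
    have hget : (PySem.Dict.mk ubi).get? i = some p.2 := by
      rw [PySem.Dict.get?_eq_some_iff_mem_items _ _ _ (by rw [hkeys]; exact hnd)]
      show (i, p.2) ∈ ubi
      rw [← hfst]
      exact hp
    rw [PySem.Dict.getD_eq_get?_getD, hget]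
    simpa using hdone
  · intro h
    rcases hg : (PySem.Dict.mk ubi).get? i with _ | u
    · exfalso
      have : (PySem.Dict.mk ubi).getD i [] = [] :=
        PySem.Dict.getD_of_get?_eq_none _ _ hg
      rw [this] at h
      simp [pvStatus, PySem.Dict.getD, PySem.Dict.get?] at h
    · have hmem : (i, u) ∈ ubi :=
        (PySem.Dict.get?_eq_some_iff_mem_items _ _ _ (by rw [hkeys]; exact hnd)).mp hg
      have hd : (PySem.Dict.mk ubi).getD i [] = u :=
        PySem.Dict.getD_of_get?_eq_some _ _ hg
      rw [hd] at h
      simp only [List.mem_map, List.mem_filter]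
      exact ⟨(i, u), ⟨hmem, by simpa using h⟩, rfl⟩

-- ===== VERDICT (by name: the statement is the Claim_ definition above) =====
theorem count_selected_not_done_units_py_spec : Claim_equal_count_selected_not_done_units_py := by
  intro sel failed ubi _ hpre
  unfold Spec_count_selected_not_done_units_py count_selected_not_done_units_py count_selected_not_done_units_py_alt
  rw [show ((PySem.Dict.mk ubi).items) = ubi from rfl]
  rw [pv_foldl_count]
  simp only [PySem.Set.len, PySem.Set.diff, PySem.Set.contains, zero_add]
  rw [← List.countP_eq_length_filter]
  congr 1
  apply List.countP_congr
  intro i _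
  have hmem := pv_mem_done ubi hpre i
  by_cases h : pvStatus ((PySem.Dict.mk ubi).getD i []) = "done"
  · have hc : List.contains (PySem.Set.ofList ((ubi.filter (fun p => (PySem.Dict.mk p.2).getD "status" "pending" == "done")).map Prod.fst)) i = true :=
      List.contains_iff_mem.mpr (hmem.mpr h)
    rw [hc]
    simp [h]
  · have hc : List.contains (PySem.Set.ofList ((ubi.filter (fun p => (PySem.Dict.mk p.2).getD "status" "pending" == "done")).map Prod.fst)) i = false := by
      rw [Bool.eq_false_iff]
      exact fun hcc => h (hmem.mp (List.contains_iff_mem.mp hcc))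
    rw [hc]
    simp [h]
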